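-- pv_equiv track=rewrite | github.com/ynput/ayon-ui-qt | css_to_qss_converter.py | format_qss_rule
-- ===== SOURCE A (Python) =====
-- from typing import Any, Dict, List, Optional, Tuple
--
-- def format_qss_rule(
--     selector: str, properties: Dict[str, str]
-- ) -> str:
--     """
--     Format QSS rule with selector and properties.
--
--     Args:
--         selector: QSS selector string
--         properties: Dictionary of QSS properties
--
--     Returns:
--         Formatted QSS rule string
--     """
--     if not properties:
--         return ""
--
--     lines = [f"{selector} {{"]
--
--     # Define property order for better readability
--     property_order = [
--         # Background and colors first
--         "background-color",
--         "color",
--         # Size properties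
--         # "min-width",
--         # "min-height",
--         "width",
--         "height",
--         # Spacing
--         "margin",
--         "margin-top",
--         "margin-right",
--         "margin-bottom",
--         "margin-left",
--         "padding",
--         "padding-top",
--         "padding-right",
--         "padding-bottom",
--         "padding-left",
--         # Border properties
--         "border",
--         "border-width",
--         "border-style",
--         "border-color",
--         "border-radius",
--         "border-top-width",
--         "border-right-width",
--         "border-bottom-width",
--         "border-left-width",
--         "border-top-style",
--         "border-right-style",
--         "border-bottom-style",
--         "border-left-style",
--         "border-top-color",
--         "border-right-color",
--         "border-bottom-color",
--         "border-left-color",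
--         "border-top-left-radius",
--         "border-top-right-radius",
--         "border-bottom-left-radius",
--         "border-bottom-right-radius",
--         # Font properties
--         "font-family",
--         "font-size",
--         "font-weight",
--         "font-style",
--         "line-height",
--         "letter-spacing",
--         # Text properties
--         "text-align",
--         "text-decoration",
--         "text-transform",
--         # Other properties
--         "opacity",
--         "outline",
--         "outline-color",
--         "outline-width",
--         "outline-style",
--     ]
--
--     # Add properties in preferred order
--     added_props = set()
--     for prop in property_order:
--         if prop in properties:
--             value = properties[prop]
--             lines.append(f"    {prop}: {value};")
--             added_props.add(prop)
--
--     # Add any remaining properties alphabetically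
--     remaining_props = sorted(set(properties.keys()) - added_props)
--     for prop in remaining_props:
--         value = properties[prop]
--         lines.append(f"    {prop}: {value};")
--
--     lines.append("}")
--     lines.append("")  # Empty line after each rule
--
--     return "\n".join(lines)
-- ===== SOURCE B (Python) =====
-- from typing import Dict
--
-- _PROPERTY_ORDER = [
--     "background-color",
--     "color",
--     "width",
--     "height",
--     "margin",
--     "margin-top",
--     "margin-right",
--     "margin-bottom",
--     "margin-left",
--     "padding",
--     "padding-top",
--     "padding-right",
--     "padding-bottom",
--     "padding-left",
--     "border",
--     "border-width",
--     "border-style",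
--     "border-color",
--     "border-radius",
--     "border-top-width",
--     "border-right-width",
--     "border-bottom-width",
--     "border-left-width",
--     "border-top-style",
--     "border-right-style",
--     "border-bottom-style",
--     "border-left-style",
--     "border-top-color",
--     "border-right-color",
--     "border-bottom-color",
--     "border-left-color",
--     "border-top-left-radius",
--     "border-top-right-radius",
--     "border-bottom-left-radius",
--     "border-bottom-right-radius",
--     "font-family",
--     "font-size",
--     "font-weight",
--     "font-style",
--     "line-height",
--     "letter-spacing",
--     "text-align",
--     "text-decoration",
--     "text-transform",
--     "opacity",
--     "outline",
--     "outline-color",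
--     "outline-width",
--     "outline-style",
-- ]
--
-- _RANK = {prop: i for i, prop in enumerate(_PROPERTY_ORDER)}
--
--
-- def format_qss_rule(selector: str, properties: Dict[str, str]) -> str:
--     """Format QSS rule: one sorted pass over the keys instead of two phases."""
--     if not properties:
--         return ""
--     n = len(_PROPERTY_ORDER)
--     body = "".join(
--         f"    {prop}: {properties[prop]};\n"
--         for prop in sorted(properties, key=lambda p: (_RANK.get(p, n), p))
--     )
--     return f"{selector} {{\n{body}}}\n"
-- ===== Notes on version B (the rewrite author's own statement) =====
-- stated objective: simpler
-- what changed: Replaced A's two-phase emission (a scan over the 49-entry property_order list with an added-set, then an alphabetical sort of the leftover keys) by one sorted pass over the keys with a composite key (rank-in-order, name), built from a rank dict; the body lines are emitted in that single loop.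
import Mathlib
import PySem

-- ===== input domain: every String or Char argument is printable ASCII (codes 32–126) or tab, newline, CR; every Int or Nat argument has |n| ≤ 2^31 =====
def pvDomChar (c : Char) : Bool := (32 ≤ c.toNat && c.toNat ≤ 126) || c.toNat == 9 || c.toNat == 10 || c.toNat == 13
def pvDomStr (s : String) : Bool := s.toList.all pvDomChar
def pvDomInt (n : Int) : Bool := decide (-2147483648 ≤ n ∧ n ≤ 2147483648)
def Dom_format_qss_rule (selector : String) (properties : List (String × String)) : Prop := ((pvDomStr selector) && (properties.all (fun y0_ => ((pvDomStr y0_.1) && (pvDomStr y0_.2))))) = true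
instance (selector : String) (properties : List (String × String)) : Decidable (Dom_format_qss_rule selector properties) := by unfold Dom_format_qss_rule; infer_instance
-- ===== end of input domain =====

-- B replaces A's two-phase emission (ordered scan with an added-set, then an alphabetical
-- sort of the leftovers) by ONE sorted pass over the keys with a composite (rank, name) key;
-- objective: simpler. The property-order list is the same module constant in both Pythons.
def qssPropertyOrder : List String :=
  ["background-color", "color", "width", "height",
   "margin", "margin-top", "margin-right", "margin-bottom", "margin-left",
   "padding", "padding-top", "padding-right", "padding-bottom", "padding-left",
   "border", "border-width", "border-style", "border-color", "border-radius",
   "border-top-width", "border-right-width", "border-bottom-width", "border-left-width",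
   "border-top-style", "border-right-style", "border-bottom-style", "border-left-style",
   "border-top-color", "border-right-color", "border-bottom-color", "border-left-color",
   "border-top-left-radius", "border-top-right-radius",
   "border-bottom-left-radius", "border-bottom-right-radius",
   "font-family", "font-size", "font-weight", "font-style", "line-height", "letter-spacing",
   "text-align", "text-decoration", "text-transform",
   "opacity", "outline", "outline-color", "outline-width", "outline-style"]

-- ===== PORT A =====
def format_qss_rule (selector : String) (properties : List (String × String)) : String :=
  if properties.isEmpty then "" else
    let d := PySem.Dict.ofList properties
    let st := qssPropertyOrder.foldl
      (fun (st : List String × PySem.Set String) prop =>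
        if d.contains prop then
          (st.1 ++ ["    " ++ prop ++ ": " ++ d.getD prop "" ++ ";"], PySem.Set.add st.2 prop)
        else st)
      ([selector ++ " {"], PySem.Set.empty)
    let remaining := PySem.List.sorted (PySem.Set.diff (PySem.Set.ofList d.keys) st.2) (fun x => x)
    let lines := st.1 ++ remaining.map (fun prop => "    " ++ prop ++ ": " ++ d.getD prop "" ++ ";")
      ++ ["}", ""]
    PySem.Str.join "\n" lines

-- ===== PORT B =====
-- rank dict: {prop: i for i, prop in enumerate(_PROPERTY_ORDER)}
def qssRank : PySem.Dict String Int :=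
  (PySem.List.enumerate qssPropertyOrder).foldl (fun r ip => r.insert ip.2 ip.1) PySem.Dict.empty

def format_qss_rule_alt (selector : String) (properties : List (String × String)) : String :=
  if properties.isEmpty then "" else
    let d := PySem.Dict.ofList properties
    let n : Int := (qssPropertyOrder.length : Int)
    let body := String.join
      ((PySem.List.sorted d.keys (fun p => toLex ((qssRank.getD p n, p) : Int × String))).map
        (fun p => "    " ++ p ++ ": " ++ d.getD p "" ++ ";\n"))
    selector ++ " {\n" ++ body ++ "}\n"

-- ===== PRECONDITION & SPEC =====
def Spec_format_qss_rule (selector : String) (properties : List (String × String)) (out : String) : Prop := out = format_qss_rule_alt selector properties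
instance (selector : String) (properties : List (String × String)) (out : String) : Decidable (Spec_format_qss_rule selector properties out) := by unfold Spec_format_qss_rule; infer_instance

-- ===== CLAIM (what is proved, stated in full; the proofs are below) =====
def Claim_equal_format_qss_rule : Prop := ∀ (selector : String) (properties : List (String × String)), Dom_format_qss_rule selector properties → Spec_format_qss_rule selector properties (format_qss_rule selector properties)

-- ===== LEMMAS AND PROOFS =====

theorem qssOrder_nodup : qssPropertyOrder.Nodup := by decide


theorem items_qssRank : qssRank.items
    = (PySem.List.enumerate qssPropertyOrder).map (fun ip => (ip.2, ip.1)) := by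
  unfold qssRank
  have h := PySem.Dict.items_foldl_insert_fresh (PySem.List.enumerate qssPropertyOrder)
      (fun ip => ip.2) (fun ip => ip.1) (PySem.Dict.empty (κ := String) (ν := Int))
      (by intro a _; exact PySem.Dict.contains_empty _)
      (by rw [PySem.List.map_snd_enumerate]; exact qssOrder_nodup)
  simpa [PySem.Dict.empty] using h

theorem keys_qssRank : qssRank.keys = qssPropertyOrder := by
  simp only [PySem.Dict.keys, items_qssRank, List.map_map]
  exact PySem.List.map_snd_enumerate qssPropertyOrder 0

theorem rank_getD_getElem (i : Nat) (hi : i < qssPropertyOrder.length) (d0 : Int) :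
    qssRank.getD qssPropertyOrder[i] d0 = (i : Int) := by
  apply PySem.Dict.getD_of_mem_items
  · rw [items_qssRank]
    exact List.mem_map.mpr ⟨((i : Int), qssPropertyOrder[i]),
      (PySem.List.mem_enumerate_iff _ _ _).mpr ⟨i, hi, by simp⟩, rfl⟩
  · rw [keys_qssRank]; exact qssOrder_nodup

theorem rank_getD_of_not_mem {p : String} (hp : p ∉ qssPropertyOrder) (d0 : Int) :
    qssRank.getD p d0 = d0 := by
  apply PySem.Dict.getD_of_not_contains
  rcases Bool.eq_false_or_eq_true (qssRank.contains p) with h | h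
  · exact absurd (keys_qssRank ▸ (PySem.Dict.contains_iff_mem_keys _ _).mp h) hp
  · exact h

theorem rank_getD_lt {p : String} (hp : p ∈ qssPropertyOrder) (d0 : Int) :
    qssRank.getD p d0 < (qssPropertyOrder.length : Int) := by
  obtain ⟨i, hi, rfl⟩ := List.mem_iff_getElem.mp hp
  rw [rank_getD_getElem i hi]
  exact_mod_cast hi

theorem ord_pairwise_rank (d0 : Int) :
    qssPropertyOrder.Pairwise (fun a b => qssRank.getD a d0 < qssRank.getD b d0) := by
  rw [List.pairwise_iff_getElem]
  intro i j hi hj hij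
  rw [rank_getD_getElem i hi, rank_getD_getElem j hj]
  exact_mod_cast hij

theorem foldl_set_add_of_disjoint {l : List String} {s : PySem.Set String}
    (hn : l.Nodup) (hd : ∀ x ∈ l, PySem.Set.contains s x = false) :
    l.foldl PySem.Set.add s = s ++ l := by
  induction l generalizing s with
  | nil => simp
  | cons x t ih =>
    have hx : PySem.Set.contains s x = false := hd x (by simp)
    have hx' : x ∉ s := by simpa [PySem.Set.contains] using hx
    have hadd : PySem.Set.add s x = s ++ [x] := by simp [PySem.Set.add, PySem.Set.contains, hx']
    rw [List.foldl_cons, hadd, ih hn.of_cons, List.append_assoc]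
    · rfl
    · intro y hy
      have hys : PySem.Set.contains s y = false := hd y (List.mem_cons_of_mem _ hy)
      have hyx : y ≠ x := by rintro rfl; exact (List.nodup_cons.mp hn).1 hy
      simp only [PySem.Set.contains] at hys ⊢
      simp_all

theorem ofList_eq_self {xs : List String} (h : xs.Nodup) : PySem.Set.ofList xs = xs := by
  have h2 := foldl_set_add_of_disjoint (s := PySem.Set.empty) h (by intro x _; rfl)
  simpa [PySem.Set.ofList, PySem.Set.empty] using h2

theorem A_fold (d : PySem.Dict String String) (init : List String) :
    qssPropertyOrder.foldl
      (fun (st : List String × PySem.Set String) prop =>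
        if d.contains prop then
          (st.1 ++ ["    " ++ prop ++ ": " ++ d.getD prop "" ++ ";"], PySem.Set.add st.2 prop)
        else st)
      (init, PySem.Set.empty)
    = (init ++ (qssPropertyOrder.filter (fun p => d.contains p)).map
         (fun p => "    " ++ p ++ ": " ++ d.getD p "" ++ ";"),
       PySem.Set.ofList (qssPropertyOrder.filter (fun p => d.contains p))) := by
  have hfun : (fun (st : List String × PySem.Set String) prop =>
        if d.contains prop then
          (st.1 ++ ["    " ++ prop ++ ": " ++ d.getD prop "" ++ ";"], PySem.Set.add st.2 prop)
        else st)
      = (fun (st : List String × PySem.Set String) prop =>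
          ((fun acc (p : String) => if d.contains p then acc ++ ["    " ++ p ++ ": " ++ d.getD p "" ++ ";"] else acc) st.1 prop,
           (fun acc (p : String) => if d.contains p then PySem.Set.add acc p else acc) st.2 prop)) := by
    funext st prop; by_cases h : d.contains prop <;> simp [h]
  rw [hfun]
  have hp := PySem.List.foldl_prod_mk
    (f := fun acc (p : String) => if d.contains p then acc ++ ["    " ++ p ++ ": " ++ d.getD p "" ++ ";"] else acc)
    (g := fun acc (p : String) => if d.contains p then PySem.Set.add acc p else acc)
    qssPropertyOrder init PySem.Set.empty
  refine hp.trans ?_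
  congr 1
  · exact PySem.List.foldl_append_if _ _ _ _
  · rw [PySem.List.foldl_if_eq_foldl_filter]
    rfl

set_option maxRecDepth 8192 in
theorem sorted_keys_split (d : PySem.Dict String String) (hk : d.keys.Nodup) :
    PySem.List.sorted d.keys
        (fun p => toLex ((qssRank.getD p (qssPropertyOrder.length : Int), p) : Int × String))
      = (qssPropertyOrder.filter (fun p => d.contains p))
        ++ PySem.List.sorted (d.keys.filter (fun p => !decide (p ∈ qssPropertyOrder))) (fun x => x) := by
  have hperm1 : (qssPropertyOrder.filter (fun p => d.contains p)).Perm
      (d.keys.filter (fun p => decide (p ∈ qssPropertyOrder))) := by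
    rw [List.perm_ext_iff_of_nodup (qssOrder_nodup.filter _) (hk.filter _)]
    intro a
    simp only [List.mem_filter, decide_eq_true_eq]
    constructor
    · rintro ⟨ha, hc⟩
      exact ⟨(PySem.Dict.contains_iff_mem_keys _ _).mp hc, ha⟩
    · rintro ⟨ha, hc⟩
      exact ⟨hc, (PySem.Dict.contains_iff_mem_keys _ _).mpr ha⟩
  apply PySem.List.sorted_eq_of_perm_of_pairwise_lt
  · exact (hperm1.append (PySem.List.sorted_perm _ _ _)).trans
      (List.filter_append_perm (fun p => decide (p ∈ qssPropertyOrder)) d.keys)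
  · rw [List.pairwise_append]
    refine ⟨?_, ?_, ?_⟩
    · refine ((ord_pairwise_rank (qssPropertyOrder.length : Int)).filter _).imp ?_
      intro a b hab
      exact (Prod.Lex.toLex_lt_toLex).mpr (Or.inl hab)
    · have hnd : (d.keys.filter (fun p => !decide (p ∈ qssPropertyOrder))).Nodup := hk.filter _
      have hpw := PySem.List.sorted_ofList_pairwise_lt
        (d.keys.filter (fun p => !decide (p ∈ qssPropertyOrder)))
      rw [ofList_eq_self hnd] at hpw
      refine hpw.imp_of_mem ?_
      intro a b ha hb hab
      have ha' : a ∉ qssPropertyOrder := by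
        have := (PySem.List.mem_sorted _ _ _ _).mp ha
        simpa using (List.mem_filter.mp this).2
      have hb' : b ∉ qssPropertyOrder := by
        have := (PySem.List.mem_sorted _ _ _ _).mp hb
        simpa using (List.mem_filter.mp this).2
      refine (Prod.Lex.toLex_lt_toLex).mpr (Or.inr ⟨?_, hab⟩)
      rw [rank_getD_of_not_mem ha', rank_getD_of_not_mem hb']
    · intro a ha b hb
      have ha' : a ∈ qssPropertyOrder := (List.mem_filter.mp ha).1
      have hb' : b ∉ qssPropertyOrder := by
        have := (PySem.List.mem_sorted _ _ _ _).mp hb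
        simpa using (List.mem_filter.mp this).2
      refine (Prod.Lex.toLex_lt_toLex).mpr (Or.inl ?_)
      rw [rank_getD_of_not_mem hb']
      exact rank_getD_lt ha' _

theorem toList_inj {s t : String} (h : s.toList = t.toList) : s = t := by
  have h2 := congrArg String.ofList h
  simpa using h2


theorem toList_join (l : List String) :
    (String.join l).toList = (l.map String.toList).flatten := by
  suffices h : ∀ (l : List String) (acc : String),
      (l.foldl (fun r s => r ++ s) acc).toList = acc.toList ++ (l.map String.toList).flatten by
    simpa using h l ""
  intro l
  induction l with
  | nil => simp
  | cons x t ih => intro acc; simp [ih, String.toList_append]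

theorem intercalate_shape (h : List Char) (xs : List (List Char)) :
    List.intercalate ['\n'] (h :: (xs ++ [['}'], []]))
      = h ++ '\n' :: ((xs.map (· ++ ['\n'])).flatten ++ ['}', '\n']) := by
  induction xs generalizing h with
  | nil => simp [List.intercalate, List.intersperse]
  | cons x t ih =>
    have : List.intercalate ['\n'] (h :: ((x :: t) ++ [['}'], []]))
        = h ++ ['\n'] ++ List.intercalate ['\n'] (x :: (t ++ [['}'], []])) := by
      simp [List.intercalate, List.intersperse]
    rw [this, ih x]
    simp

theorem toList_strjoin (l : List String) :
    (PySem.Str.join "\n" l).toList = List.intercalate ['\n'] (l.map String.toList) := by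
  simp [PySem.Str.join, PySem.Chars.join]


theorem toList_rbrace : ("}" : String).toList = ['}'] := by decide

theorem toList_semi : (";" : String).toList = [';'] := by decide

theorem toList_semi_nl : (";\n" : String).toList = [';', '\n'] := by decide

theorem toList_lbrace : (" {" : String).toList = [' ', '{'] := by decide

theorem toList_lbrace_nl : (" {\n" : String).toList = [' ', '{', '\n'] := by decide

theorem toList_rbrace_nl : ("}\n" : String).toList = ['}', '\n'] := by decide

theorem assemble (sel : String) (f : String → String) (L : List String) :
    PySem.Str.join "\n" (((sel ++ " {") :: L.map (fun p => f p ++ ";")) ++ ["}", ""])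
      = sel ++ " {\n" ++ String.join (L.map (fun p => f p ++ ";\n")) ++ "}\n" := by
  apply toList_inj
  rw [toList_strjoin]
  have hmap : ((((sel ++ " {") :: L.map (fun p => f p ++ ";")) ++ ["}", ""]).map String.toList)
      = (sel ++ " {").toList :: ((L.map (fun p => f p ++ ";")).map String.toList ++ [['}'], []]) := by
    simp [toList_rbrace]
  rw [hmap, intercalate_shape]
  simp only [String.toList_append, toList_join, List.map_map]
  simp [toList_lbrace, toList_lbrace_nl, toList_rbrace_nl, List.append_assoc]
  refine congrArg List.flatten (List.map_congr_left ?_)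
  intro p _
  simp [Function.comp, String.toList_append, toList_semi, toList_semi_nl, List.append_assoc]

-- ===== VERDICT (by name: the statement is the Claim_ definition above) =====
theorem format_qss_rule_spec : Claim_equal_format_qss_rule := by
  unfold Claim_equal_format_qss_rule Spec_format_qss_rule
  intro selector properties _
  unfold format_qss_rule format_qss_rule_alt
  by_cases hemp : properties.isEmpty
  · simp [hemp]
  · simp only [hemp, Bool.false_eq_true, if_false]
    have hk : (PySem.Dict.ofList properties).keys.Nodup := PySem.Dict.nodup_keys_ofList properties
    set d := PySem.Dict.ofList properties with hd
    rw [A_fold d]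
    have hrem : PySem.Set.diff (PySem.Set.ofList d.keys)
        (PySem.Set.ofList (qssPropertyOrder.filter (fun p => d.contains p)))
        = d.keys.filter (fun p => !decide (p ∈ qssPropertyOrder)) := by
      show (PySem.Set.ofList d.keys).filter
          (fun x => !(PySem.Set.ofList (qssPropertyOrder.filter (fun p => d.contains p))).contains x) = _
      rw [ofList_eq_self hk]
      apply List.filter_congr
      intro p hp
      have hcp : d.contains p = true := (PySem.Dict.contains_iff_mem_keys _ _).mpr hp
      have hiff : (PySem.Set.ofList (qssPropertyOrder.filter (fun q => d.contains q))).contains p = true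
          ↔ p ∈ qssPropertyOrder := by
        constructor
        · intro hc
          have hmem : p ∈ PySem.Set.ofList (qssPropertyOrder.filter (fun q => d.contains q)) := by
            simpa [PySem.Set.contains] using hc
          exact (List.mem_filter.mp ((PySem.Set.mem_ofList _ _).mp hmem)).1
        · intro hmem
          have hx : p ∈ PySem.Set.ofList (qssPropertyOrder.filter (fun q => d.contains q)) :=
            (PySem.Set.mem_ofList _ _).mpr (List.mem_filter.mpr ⟨hmem, hcp⟩)
          simpa [PySem.Set.contains] using hx
      congr 1
      rcases Bool.eq_false_or_eq_true
          ((PySem.Set.ofList (qssPropertyOrder.filter (fun q => d.contains q))).contains p) with hc | hc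
      · rw [hc]; simp [hiff.mp hc]
      · rw [hc]
        have hnm : p ∉ qssPropertyOrder := fun hm => absurd (hiff.mpr hm) (fun h2 => by rw [h2] at hc; exact Bool.noConfusion hc)
        simp [hnm]
    rw [hrem, sorted_keys_split d hk]
    generalize qssPropertyOrder.filter (fun p => d.contains p) = K
    generalize PySem.List.sorted (d.keys.filter (fun p => !decide (p ∈ qssPropertyOrder))) (fun x => x) = R
    have hshape : (([selector ++ " {"]
          ++ K.map (fun p => "    " ++ p ++ ": " ++ d.getD p "" ++ ";"))
          ++ R.map (fun p => "    " ++ p ++ ": " ++ d.getD p "" ++ ";")) ++ ["}", ""]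
        = ((selector ++ " {") :: (K ++ R).map (fun p => "    " ++ p ++ ": " ++ d.getD p "" ++ ";"))
          ++ ["}", ""] := by
      simp [List.map_append]
    rw [hshape]
    exact assemble selector (fun p => "    " ++ p ++ ": " ++ d.getD p "") (K ++ R)
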